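-- pv_equiv track=rewrite | github.com/orut34iop/QuantMind | scripts/training/extract_snapshot_features.py | _ordered_intersection
-- ===== SOURCE A (Python) =====
-- from typing import Iterable, List, Set
--
-- def _ordered_intersection(col_lists: List[List[str]]) -> List[str]:
--     if not col_lists:
--         return []
--     base = col_lists[0]
--     common = set(base)
--     for cols in col_lists[1:]:
--         common &= set(cols)
--     return [c for c in base if c in common]
-- ===== SOURCE B (Python) =====
-- def _ordered_intersection(col_lists):
--     # Progressive narrowing by recursion: keep filtering the running candidate
--     # list against each remaining column list; no global intersection set and
--     # no final re-scan of the base list.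
--     if not col_lists:
--         return []
--
--     def narrow(cur, rest):
--         if not rest:
--             return cur
--         s = set(rest[0])
--         return narrow([c for c in cur if c in s], rest[1:])
--
--     return narrow(col_lists[0], col_lists[1:])
-- ===== Notes on version B (the rewrite author's own statement) =====
-- stated objective: alternative
-- what changed: Replaces A's staged design (reduce all lists to one intersection set, then re-scan the base list) by recursive progressive narrowing: the first list itself is filtered in place against each subsequent list, so no intersection set and no final pass over the base exist.
import Mathlib
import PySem

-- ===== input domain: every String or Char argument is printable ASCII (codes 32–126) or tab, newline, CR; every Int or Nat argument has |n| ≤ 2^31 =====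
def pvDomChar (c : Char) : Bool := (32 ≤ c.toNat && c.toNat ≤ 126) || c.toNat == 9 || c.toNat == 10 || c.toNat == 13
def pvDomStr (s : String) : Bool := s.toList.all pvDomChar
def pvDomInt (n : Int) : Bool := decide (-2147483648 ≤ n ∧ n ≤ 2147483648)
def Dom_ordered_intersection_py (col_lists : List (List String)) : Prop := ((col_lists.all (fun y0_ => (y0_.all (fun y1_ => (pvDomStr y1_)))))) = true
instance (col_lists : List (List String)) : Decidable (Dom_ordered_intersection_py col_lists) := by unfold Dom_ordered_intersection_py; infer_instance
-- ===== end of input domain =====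

-- B replaces A's intersection-set-then-rescan design by recursive progressive
-- narrowing of the first list against each remaining list; same result and cost.

-- ===== PORT A =====
def ordered_intersection_py (col_lists : List (List String)) : List String :=
  match col_lists with
  | [] => []
  | base :: rest =>
    let common := rest.foldl (fun s cols => PySem.Set.inter s (PySem.Set.ofList cols))
      (PySem.Set.ofList base)
    base.filter (fun c => PySem.Set.contains common c)

-- ===== PORT B =====
-- recursive helper 'narrow' from Source B
def pvNarrow (cur : List String) (rest : List (List String)) : List String :=
  match rest with
  | [] => cur
  | cols :: t =>
    let s := PySem.Set.ofList cols
    pvNarrow (cur.filter (fun c => PySem.Set.contains s c)) t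

def ordered_intersection_py_alt (col_lists : List (List String)) : List String :=
  match col_lists with
  | [] => []
  | base :: rest => pvNarrow base rest

-- ===== PRECONDITION & SPEC =====
def Spec_ordered_intersection_py (col_lists : List (List String)) (out : List String) : Prop := out = ordered_intersection_py_alt col_lists
instance (col_lists : List (List String)) (out : List String) : Decidable (Spec_ordered_intersection_py col_lists out) := by unfold Spec_ordered_intersection_py; infer_instance

-- ===== CLAIM (what is proved, stated in full; the proofs are below) =====
def Claim_equal_ordered_intersection_py : Prop := ∀ (col_lists : List (List String)), Dom_ordered_intersection_py col_lists → Spec_ordered_intersection_py col_lists (ordered_intersection_py col_lists)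

-- ===== LEMMAS AND PROOFS =====

-- Membership in A's intersection fold: in the seed set and in every list.
lemma mem_foldl_inter (lists : List (List String)) (s : PySem.Set String) (x : String) :
    (x ∈ lists.foldl (fun s cols => PySem.Set.inter s (PySem.Set.ofList cols)) s) ↔
      x ∈ s ∧ ∀ l ∈ lists, x ∈ l := by
  induction lists generalizing s with
  | nil => simp
  | cons h t ih =>
    simp only [List.foldl_cons, ih, PySem.Set.mem_inter, PySem.Set.mem_ofList,
      List.mem_cons]
    constructor
    · rintro ⟨⟨hs, hh⟩, ht⟩
      exact ⟨hs, fun l hl => hl.elim (fun e => e ▸ hh) (ht l)⟩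
    · rintro ⟨hs, hall⟩
      exact ⟨⟨hs, hall h (Or.inl rfl)⟩, fun l hl => hall l (Or.inr hl)⟩

-- B's recursion: narrowing cur through rest keeps exactly the elements of cur
-- that are members of every list in rest.
lemma pvNarrow_eq_filter (rest : List (List String)) (cur : List String) :
    pvNarrow cur rest = cur.filter (fun c => decide (∀ l ∈ rest, c ∈ l)) := by
  induction rest generalizing cur with
  | nil => simp [pvNarrow]
  | cons h t ih =>
    simp only [pvNarrow, ih, List.filter_filter]
    apply List.filter_congr
    intro c _
    simp [PySem.Set.mem_ofList, Bool.and_comm]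

-- ===== VERDICT (by name: the statement is the Claim_ definition above) =====
theorem ordered_intersection_py_spec : Claim_equal_ordered_intersection_py := by
  intro col_lists _
  unfold Spec_ordered_intersection_py
  cases col_lists with
  | nil => rfl
  | cons base rest =>
    simp only [ordered_intersection_py, ordered_intersection_py_alt,
      pvNarrow_eq_filter]
    apply List.filter_congr
    intro c hc
    rw [Bool.eq_iff_iff, PySem.Set.contains_iff, mem_foldl_inter]
    simp [PySem.Set.mem_ofList, hc]
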